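-- pv_equiv track=rewrite | github.com/k-papadakis/advent-of-code | day_06/solution.py | first_n_unique
-- ===== SOURCE A (Python) =====
-- from collections import deque
--
-- def first_n_unique(iterable, n):
--     queue = deque()
--     counter = {}
--
--     for i, right in enumerate(iterable, 1):
--
--         queue.append(right)
--         counter[right] = counter.get(right, 0) + 1
--
--         if len(queue) < n:
--             continue
--
--         if len(counter) == n:
--             return i
--
--         left = queue.popleft()
--         counter[left] -= 1
--         if counter[left] == 0:
--             counter.pop(left)
-- ===== SOURCE B (Python) =====
-- def first_n_unique(iterable, n):
--     last = {}
--     start = 0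
--     for i, c in enumerate(iterable):
--         if c in last and last[c] >= start:
--             start = last[c] + 1
--         last[c] = i
--         if i - start + 1 == n:
--             return i + 1
-- ===== Notes on version B (the rewrite author's own statement) =====
-- stated objective: idiomatic
-- what changed: Replaces the deque+multiset-counter sliding window with a last-seen-index dict and a jumping window start (the standard longest-distinct-substring technique); one dict operation per character instead of queue and counter maintenance.
import Mathlib
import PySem

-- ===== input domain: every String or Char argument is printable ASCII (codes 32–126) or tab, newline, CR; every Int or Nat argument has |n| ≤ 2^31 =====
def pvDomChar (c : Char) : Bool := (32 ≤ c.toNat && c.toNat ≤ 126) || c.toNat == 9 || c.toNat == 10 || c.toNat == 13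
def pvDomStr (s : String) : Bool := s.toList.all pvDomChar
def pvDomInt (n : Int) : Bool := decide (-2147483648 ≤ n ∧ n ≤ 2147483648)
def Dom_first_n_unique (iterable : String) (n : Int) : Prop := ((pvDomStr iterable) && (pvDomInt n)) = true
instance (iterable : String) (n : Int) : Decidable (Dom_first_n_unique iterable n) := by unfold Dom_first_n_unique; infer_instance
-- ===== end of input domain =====

-- B replaces A's deque+counter sliding window by the standard last-seen-index dict with a
-- jumping window start (idiomatic longest-distinct-window technique); same O(len) cost.

-- ===== PORT A =====
-- literal port of A's loop: queue = deque contents, counter = the dict, i = 1-based index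
def pvLoopA (n : Int) : List Char → List Char → PySem.Dict Char Int → Int → Option Int
  | [], _, _, _ => none
  | c :: rest, queue, counter, i =>
    let q := queue ++ [c]
    let cnt := counter.insert c (counter.getD c 0 + 1)
    if (q.length : Int) < n then
      pvLoopA n rest q cnt (i + 1)
    else if (cnt.size : Int) = n then
      some i
    else
      match q with
      | [] => none   -- unreachable: q ends with the just-appended c (Python popleft never raises here)
      | left :: q' =>
        let v := cnt.getD left 0 - 1        -- counter[left] -= 1 (key is present)
        let cnt2 := cnt.insert left v
        pvLoopA n rest q' (if v = 0 then cnt2.erase left else cnt2) (i + 1)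

def first_n_unique (iterable : String) (n : Int) : Option Int :=
  pvLoopA n iterable.toList [] PySem.Dict.empty 1

-- ===== PORT B =====
-- literal port of B's loop: last = last-seen-index dict, start = window left edge, i = 0-based index
def pvLoopB (n : Int) : List Char → PySem.Dict Char Int → Int → Int → Option Int
  | [], _, _, _ => none
  | c :: rest, last, start, i =>
    let start' := match last.get? c with
      | some j => if start ≤ j then j + 1 else start   -- c in last and last[c] >= start
      | none => start
    let last' := last.insert c i
    if i - start' + 1 = n then some (i + 1)
    else pvLoopB n rest last' start' (i + 1)

def first_n_unique_alt (iterable : String) (n : Int) : Option Int :=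
  pvLoopB n iterable.toList PySem.Dict.empty 0 0

-- ===== PRECONDITION & SPEC =====
def Spec_first_n_unique (iterable : String) (n : Int) (out : Option Int) : Prop := out = first_n_unique_alt iterable n
instance (iterable : String) (n : Int) (out : Option Int) : Decidable (Spec_first_n_unique iterable n out) := by unfold Spec_first_n_unique; infer_instance

-- ===== CLAIM (what is proved, stated in full; the proofs are below) =====
def Claim_equal_first_n_unique : Prop := ∀ (iterable : String) (n : Int), Dom_first_n_unique iterable n → Spec_first_n_unique iterable n (first_n_unique iterable n)

-- ===== LEMMAS AND PROOFS =====

-- n ≤ 0: neither loop can ever fire its return test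
lemma pvLoopA_nonpos (n : Int) (hn : n ≤ 0) :
    ∀ (rest q : List Char) (cnt : PySem.Dict Char Int) (i : Int),
      pvLoopA n rest q cnt i = none := by
  intro rest
  induction rest with
  | nil => intro q cnt i; rfl
  | cons c rest ih =>
    intro q cnt i
    rw [pvLoopA]
    have h1 : ¬ (((q ++ [c]).length : Int) < n) := by
      have : (q ++ [c]).length = q.length + 1 := by simp
      rw [this]; push_cast; omega
    have h2 : ¬ (((PySem.Dict.insert cnt c (cnt.getD c 0 + 1)).size : Int) = n) := by
      have : 1 ≤ (PySem.Dict.insert cnt c (cnt.getD c 0 + 1)).size := by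
        simp only [PySem.Dict.size, PySem.Dict.insert]
        split
        · rename_i h
          simp only [PySem.Dict.contains, List.any_eq_true] at h
          obtain ⟨p, hp, -⟩ := h
          simp only [List.length_map]
          exact List.length_pos_of_mem hp
        · simp
      omega
    simp only [h1, if_false, h2]
    cases q with
    | nil => simp [ih]
    | cons a as => simp [ih]

lemma pvLoopB_nonpos (n : Int) (hn : n ≤ 0) :
    ∀ (rest : List Char) (last : PySem.Dict Char Int) (start i : Int),
      start ≤ i → (∀ ch j, last.get? ch = some j → j < i) →
      pvLoopB n rest last start i = none := by
  intro rest
  induction rest with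
  | nil => intros; rfl
  | cons c rest ih =>
    intro last start i hsi hlt
    rw [pvLoopB]
    obtain ⟨s', hs'eq, hs'le⟩ : ∃ s', (match last.get? c with
        | some j => if start ≤ j then j + 1 else start
        | none => start) = s' ∧ s' ≤ i := by
      rcases h : last.get? c with _ | j
      · exact ⟨start, rfl, hsi⟩
      · show ∃ s', (if start ≤ j then j + 1 else start) = s' ∧ s' ≤ i
        have := hlt c j h
        exact ⟨_, rfl, by split <;> omega⟩
    rw [hs'eq]
    have h1 : ¬ (i - s' + 1 = n) := by omega
    simp only [h1, if_false]
    apply ih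
    · omega
    · intro ch j h
      rcases eq_or_ne ch c with rfl | hne
      · rw [PySem.Dict.get?_insert_self] at h
        simp only [Option.some.injEq] at h
        omega
      · rw [PySem.Dict.get?_insert_of_ne _ _ hne] at h
        have := hlt ch j h; omega

-- index of the LAST occurrence of ch in p (none if absent)
def pvLastOcc : List Char → Char → Option Nat
  | [], _ => none
  | a :: p, ch =>
    match pvLastOcc p ch with
    | some j => some (j + 1)
    | none => if a = ch then some 0 else none

lemma pvLastOcc_append (p : List Char) (c ch : Char) :
    pvLastOcc (p ++ [c]) ch = if c = ch then some p.length else pvLastOcc p ch := by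
  induction p with
  | nil => simp [pvLastOcc]
  | cons a p ih =>
    simp only [List.cons_append, pvLastOcc, ih, List.length_cons]
    rcases eq_or_ne c ch with rfl | hc
    · simp
    · simp only [hc, if_false]

lemma pvLastOcc_eq_none (p : List Char) (ch : Char) :
    pvLastOcc p ch = none ↔ ch ∉ p := by
  induction p with
  | nil => simp [pvLastOcc]
  | cons a p ih =>
    simp only [pvLastOcc, List.mem_cons]
    rcases h : pvLastOcc p ch with _ | j
    · have hnp : ch ∉ p := ih.mp h
      rcases eq_or_ne a ch with rfl | ha
      · simp
      · simp [ha, Ne.symm ha, hnp]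
    · simp only [reduceCtorEq, false_iff, not_or]
      intro hcon
      rw [ih.mpr hcon.2] at h
      exact absurd h (by simp)

lemma pvLastOcc_spec (p : List Char) (ch : Char) (j : Nat) (h : pvLastOcc p ch = some j) :
    j < p.length ∧ p[j]? = some ch ∧ ch ∉ p.drop (j + 1) := by
  induction p generalizing j with
  | nil => simp [pvLastOcc] at h
  | cons a p ih =>
    simp only [pvLastOcc] at h
    rcases h' : pvLastOcc p ch with _ | j'
    · rw [h'] at h
      rcases eq_or_ne a ch with rfl | ha
      · rw [if_pos rfl] at h
        obtain rfl : j = 0 := by simpa using h.symm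
        simpa using (pvLastOcc_eq_none p a).mp h'
      · simp [ha] at h
    · rw [h'] at h
      simp only [Option.some.injEq] at h
      subst h
      obtain ⟨h1, h2, h3⟩ := ih j' h'
      refine ⟨by simpa using h1, by simpa using h2, by simpa using h3⟩

-- erase lemmas (key-wise behaviour of PySem.Dict.erase)
lemma pvDict_get?_erase (d : PySem.Dict Char Int) (l ch : Char) :
    (d.erase l).get? ch = if ch = l then none else d.get? ch := by
  obtain ⟨items⟩ := d
  simp only [PySem.Dict.erase, PySem.Dict.get?]
  induction items with
  | nil => simp
  | cons p ps ih =>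
    by_cases hpl : p.1 = l
    · rw [List.filter_cons_of_neg (by simp [hpl])]
      rw [ih]
      by_cases hchl : ch = l
      · simp [hchl]
      · rw [if_neg hchl, if_neg hchl,
          List.find?_cons_of_neg (by simp [hpl]; exact fun hc => hchl hc.symm)]
    · rw [List.filter_cons_of_pos (by simp [hpl])]
      by_cases hpch : p.1 = ch
      · have hchl : ¬ ch = l := fun e => hpl (hpch.trans e)
        rw [List.find?_cons_of_pos (by simp [hpch]), List.find?_cons_of_pos (by simp [hpch]),
          if_neg hchl]
      · rw [List.find?_cons_of_neg (by simp [hpch]), List.find?_cons_of_neg (by simp [hpch]), ih]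

lemma pvDict_keys_erase (d : PySem.Dict Char Int) (l : Char) :
    (d.erase l).keys = d.keys.filter (fun k => !(k == l)) := by
  obtain ⟨items⟩ := d
  simp only [PySem.Dict.erase, PySem.Dict.keys]
  induction items with
  | nil => simp
  | cons p ps ih =>
    simp only [List.filter_cons, List.map_cons]
    rcases h : (!(p.1 == l)) with _ | _
    · simpa [h] using ih
    · simp [ih]

-- two Nodup lists with the same members have the same length
lemma pvLen_eq_of_mem_iff {xs ys : List Char} (hx : xs.Nodup) (hy : ys.Nodup)
    (h : ∀ a, a ∈ xs ↔ a ∈ ys) : xs.length = ys.length := by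
  rw [← List.toFinset_card_of_nodup hx, ← List.toFinset_card_of_nodup hy]
  congr 1
  ext a
  simpa using h a

-- size of the counter = number of distinct elements of the tracked multiset
lemma pvSize_eq_dedup (cnt : PySem.Dict Char Int) (q : List Char)
    (hk : cnt.keys.Nodup) (hm : ∀ ch, ch ∈ cnt.keys ↔ ch ∈ q) :
    cnt.size = q.dedup.length := by
  have : cnt.size = cnt.keys.length := by
    simp [PySem.Dict.size, PySem.Dict.keys]
  rw [this]
  exact pvLen_eq_of_mem_iff hk q.nodup_dedup (fun a => by rw [hm a, List.mem_dedup])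

lemma pvNodup_append_singleton (xs : List Char) (c : Char) :
    (xs ++ [c]).Nodup ↔ xs.Nodup ∧ c ∉ xs := by
  simp only [List.nodup_append, List.nodup_cons, List.not_mem_nil, not_false_eq_true,
    List.nodup_nil, and_self, List.mem_cons, or_false, ne_eq, forall_eq, true_and,
    and_congr_right_iff]
  intro _
  constructor
  · intro h2 hc
    exact h2 c hc rfl
  · intro h2 a ha hac
    exact h2 (hac ▸ ha)

-- the main simulation: one invariant tying A's (queue, counter) and B's (last, start) to the processed prefix p
lemma pvMain (n : Int) (nn : Nat) (hn : n = (nn : Int)) (hnn : 1 ≤ nn) :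
    ∀ (rest p q : List Char) (cnt last : PySem.Dict Char Int) (startN : Nat),
      q = p.drop (p.length - (nn - 1)) →
      (∀ ch, cnt.getD ch 0 = (q.count ch : Int)) →
      cnt.keys.Nodup →
      (∀ ch, ch ∈ cnt.keys ↔ ch ∈ q) →
      (∀ ch, last.get? ch = (pvLastOcc p ch).map (fun j => (j : Int))) →
      startN ≤ p.length →
      (p.drop startN).Nodup →
      (∀ m, m < startN → ¬ (p.drop m).Nodup) →
      p.length - startN < nn →
      pvLoopA n rest q cnt ((p.length : Int) + 1) = pvLoopB n rest last (startN : Int) (p.length : Int) := by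
  intro rest
  induction rest with
  | nil => intros; rfl
  | cons c rest ih =>
    intro p q cnt last startN hq hcnt hkeys hmem hlast hsl hnd hmin hlen
    -- window-arithmetic helpers
    have dropNodup : ∀ m1 m2 : ℕ, m1 ≤ m2 → (p.drop m1).Nodup → (p.drop m2).Nodup :=
      fun m1 m2 h hn => hn.sublist (List.drop_sublist_drop_left p h)
    have dropMem : ∀ (m1 m2 : ℕ) (a : Char), m1 ≤ m2 → a ∈ p.drop m2 → a ∈ p.drop m1 :=
      fun m1 m2 a h ha => (List.drop_sublist_drop_left p h).mem ha
    -- B's new window start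
    obtain ⟨startN', hB, hge, hle', hnin, hcmem⟩ :
      ∃ s : ℕ, ((match last.get? c with
          | some j => if (startN : Int) ≤ j then j + 1 else (startN : Int)
          | none => (startN : Int)) = (s : Int))
        ∧ startN ≤ s ∧ s ≤ p.length ∧ c ∉ p.drop s
        ∧ (∀ m, startN ≤ m → m < s → c ∈ p.drop m) := by
      rcases hLO : pvLastOcc p c with _ | j
      · refine ⟨startN, ?_, le_refl _, hsl, ?_, ?_⟩
        · rw [hlast c, hLO]; rfl
        · intro hcon
          exact (pvLastOcc_eq_none p c).mp hLO ((List.drop_subset _ _) hcon)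
        · intro m h1 h2; omega
      · obtain ⟨hj, pj, hnotafter⟩ := pvLastOcc_spec p c j hLO
        by_cases hcase : startN ≤ j
        · refine ⟨j + 1, ?_, by omega, by omega, hnotafter, ?_⟩
          · rw [hlast c, hLO]
            show (if (startN : Int) ≤ (j : Int) then (j : Int) + 1 else (startN : Int))
              = ((j + 1 : ℕ) : Int)
            rw [if_pos (by exact_mod_cast hcase)]
            push_cast; ring
          · intro m h1 h2
            have : (p.drop m)[j - m]? = some c := by
              rw [List.getElem?_drop, show m + (j - m) = j by omega, pj]
            exact List.mem_of_getElem? this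
        · refine ⟨startN, ?_, le_refl _, hsl, ?_, ?_⟩
          · rw [hlast c, hLO]
            show (if (startN : Int) ≤ (j : Int) then (j : Int) + 1 else (startN : Int))
              = ((startN : ℕ) : Int)
            rw [if_neg (by exact_mod_cast hcase)]
          · intro hcon
            exact hnotafter (dropMem (j + 1) startN c (by omega) hcon)
          · intro m h1 h2; omega
    -- the extended prefix
    have hq' : q ++ [c] = (p ++ [c]).drop (p.length + 1 - nn) := by
      rw [hq, List.drop_append_of_le_length (by omega)]
      congr 2
      omega
    have hlenq' : (q ++ [c]).length = p.length + 1 - (p.length + 1 - nn) := by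
      rw [hq', List.length_drop, List.length_append, List.length_singleton]
    have hdrop' : ∀ m : ℕ, m ≤ p.length → (p ++ [c]).drop m = p.drop m ++ [c] := by
      intro m hm
      rw [List.drop_append_of_le_length hm]
    -- new-start invariants on p ++ [c]
    have hnd' : ((p ++ [c]).drop startN').Nodup := by
      rw [hdrop' _ hle', pvNodup_append_singleton]
      exact ⟨dropNodup _ _ hge hnd, hnin⟩
    have hmin' : ∀ m, m < startN' → ¬ ((p ++ [c]).drop m).Nodup := by
      intro m hm hcon
      rw [hdrop' _ (by omega), pvNodup_append_singleton] at hcon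
      by_cases hm2 : m < startN
      · exact hmin m hm2 hcon.1
      · exact hcon.2 (hcmem m (by omega) hm)
    have hwb : p.length + 1 - startN' ≤ nn := by omega
    -- A's new counter tracks q ++ [c]
    have hcnt1 : ∀ ch, (cnt.insert c (cnt.getD c 0 + 1)).getD ch 0 = ((q ++ [c]).count ch : Int) := by
      intro ch
      rw [PySem.Dict.getD_insert]
      rcases eq_or_ne ch c with rfl | hne
      · rw [if_pos rfl, hcnt ch, List.count_append]
        simp
      · rw [if_neg hne, hcnt ch, List.count_append]
        simp only [List.count_singleton]
        have : ¬ c = ch := Ne.symm hne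
        simp [this]
    have hkeys1 : (cnt.insert c (cnt.getD c 0 + 1)).keys.Nodup :=
      PySem.Dict.nodup_keys_insert _ _ _ hkeys
    have hmem1 : ∀ ch, ch ∈ (cnt.insert c (cnt.getD c 0 + 1)).keys ↔ ch ∈ q ++ [c] := by
      intro ch
      rw [PySem.Dict.mem_keys_insert, hmem ch]
      simp [or_comm]
    -- the return tests of A and B fire together
    have hEquiv : (p.length + 1 - startN' = nn) ↔ (nn ≤ p.length + 1 ∧ (q ++ [c]).Nodup) := by
      constructor
      · intro h
        have h0 : startN' = p.length + 1 - nn := by omega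
        refine ⟨by omega, ?_⟩
        rw [hq', ← h0]
        exact hnd'
      · rintro ⟨h1, h2⟩
        have : ¬ (p.length + 1 - nn < startN') := by
          intro hcon
          exact hmin' _ hcon (hq' ▸ h2)
        omega
    have hlast1 : ∀ ch, (last.insert c (p.length : Int)).get? ch
        = (pvLastOcc (p ++ [c]) ch).map (fun j => (j : Int)) := by
      intro ch
      rw [pvLastOcc_append, PySem.Dict.get?_insert]
      rcases eq_or_ne ch c with rfl | hne
      · simp
      · rw [if_neg hne, if_neg (show ¬ c = ch from Ne.symm hne), hlast ch]
    rw [pvLoopA, pvLoopB]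
    simp only [hB]
    by_cases hret : p.length + 1 - startN' = nn
    · -- both return p.length + 1
      obtain ⟨hbig, hnodup⟩ := hEquiv.mp hret
      have c1 : ¬ (((q ++ [c]).length : Int) < n) := by
        rw [hlenq', hn]; omega
      have c2 : (((cnt.insert c (cnt.getD c 0 + 1)).size : Int)) = n := by
        rw [pvSize_eq_dedup _ _ hkeys1 hmem1, hnodup.dedup, hlenq', hn]
        omega
      rw [if_neg c1, if_pos c2, if_pos (show (p.length : Int) - (startN' : Int) + 1 = n by
        rw [hn]; omega)]
    · have cB : ¬ ((p.length : Int) - (startN' : Int) + 1 = n) := by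
        rw [hn]; omega
      rw [if_neg cB]
      have hlen' : p.length + 1 - startN' < nn := by omega
      by_cases hsmall : p.length + 1 < nn
      · -- window still growing: A takes the continue branch
        have c1 : (((q ++ [c]).length : Int) < n) := by
          rw [hlenq', hn]; omega
        rw [if_pos c1]
        have H := ih (p ++ [c]) (q ++ [c]) _ _ startN'
          (by rw [hq']; congr 1; simp; omega)
          hcnt1 hkeys1 hmem1 hlast1
          (by simp; omega) hnd' hmin'
          (by simp; omega)
        simpa using H
      · -- full window, not all distinct: A pops
        have c1 : ¬ (((q ++ [c]).length : Int) < n) := by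
          rw [hlenq', hn]; omega
        have hnotnodup : ¬ (q ++ [c]).Nodup := fun h => hret (hEquiv.mpr ⟨by omega, h⟩)
        have c2 : ¬ (((cnt.insert c (cnt.getD c 0 + 1)).size : Int) = n) := by
          rw [pvSize_eq_dedup _ _ hkeys1 hmem1, hn]
          intro hcon
          have hdl : (q ++ [c]).dedup.length = (q ++ [c]).length := by
            rw [hlenq']; omega
          have heq := ((q ++ [c]).dedup_sublist).eq_of_length hdl
          exact hnotnodup (heq ▸ (q ++ [c]).nodup_dedup)
        rw [if_neg c1, if_neg c2]
        obtain ⟨left, q'', hcons⟩ : ∃ left q'', q ++ [c] = left :: q'' := by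
          cases q with
          | nil => exact ⟨c, [], rfl⟩
          | cons a as => exact ⟨a, as ++ [c], rfl⟩
        set cnt1 := cnt.insert c (cnt.getD c 0 + 1) with hc1
        rw [hcons]
        show pvLoopA n rest q''
            (if cnt1.getD left 0 - 1 = 0
             then (cnt1.insert left (cnt1.getD left 0 - 1)).erase left
             else cnt1.insert left (cnt1.getD left 0 - 1)) ((p.length : Int) + 1 + 1)
          = pvLoopB n rest (last.insert c (p.length : Int)) (startN' : Int) ((p.length : Int) + 1)
        -- the popped window tail
        have hq''eq : q'' = (p ++ [c]).drop (p.length + 1 - nn + 1) := by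
          have ht := congrArg List.tail (hcons ▸ hq')
          simpa [List.tail_drop] using ht
        have hcl : ∀ ch, cnt1.getD ch 0 = ((left :: q'').count ch : Int) := by
          intro ch; rw [hcnt1 ch, hcons]
        have hvleft : cnt1.getD left 0 = (q''.count left : Int) + 1 := by
          rw [hcl left]; simp
        have hcnt2 : ∀ ch, (cnt1.insert left (cnt1.getD left 0 - 1)).getD ch 0
            = (q''.count ch : Int) := by
          intro ch
          rw [PySem.Dict.getD_insert]
          rcases eq_or_ne ch left with rfl | hne
          · rw [if_pos rfl, hvleft]; ring
          · rw [if_neg hne, hcl ch]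
            simp [Ne.symm hne]
        have hkeys2 : (cnt1.insert left (cnt1.getD left 0 - 1)).keys.Nodup :=
          PySem.Dict.nodup_keys_insert _ _ _ hkeys1
        have hmem2 : ∀ ch, ch ∈ (cnt1.insert left (cnt1.getD left 0 - 1)).keys
            ↔ (ch = left ∨ ch ∈ q'') := by
          intro ch
          rw [PySem.Dict.mem_keys_insert, hmem1 ch, hcons]
          simp [List.mem_cons]
        -- shared invariant bundle for the recursive call
        have hqinv : q'' = (p ++ [c]).drop ((p ++ [c]).length - (nn - 1)) := by
          rw [hq''eq]
          congr 1
          simp only [List.length_append, List.length_singleton]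
          omega
        have hslinv : startN' ≤ (p ++ [c]).length := by
          simp only [List.length_append, List.length_singleton]; omega
        have hleninv : (p ++ [c]).length - startN' < nn := by
          simp only [List.length_append, List.length_singleton]; omega
        by_cases hv0 : cnt1.getD left 0 - 1 = 0
        · rw [if_pos hv0]
          have hnotin2 : left ∉ q'' := by
            intro hcon
            have := hvleft ▸ hv0
            have hcp : 0 < q''.count left := List.count_pos_iff.mpr hcon
            omega
          have hgd3 : ∀ ch, (((cnt1.insert left (cnt1.getD left 0 - 1)).erase left)).getD ch 0
              = (q''.count ch : Int) := by
            intro ch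
            rw [PySem.Dict.getD_eq_get?_getD, pvDict_get?_erase]
            rcases eq_or_ne ch left with rfl | hne
            · rw [if_pos rfl]
              simp [List.count_eq_zero_of_not_mem hnotin2]
            · rw [if_neg hne, ← PySem.Dict.getD_eq_get?_getD, hcnt2 ch]
          have hkeys3 : (((cnt1.insert left (cnt1.getD left 0 - 1)).erase left)).keys.Nodup := by
            rw [pvDict_keys_erase]
            exact hkeys2.filter _
          have hmem3 : ∀ ch, ch ∈ (((cnt1.insert left (cnt1.getD left 0 - 1)).erase left)).keys
              ↔ ch ∈ q'' := by
            intro ch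
            rw [pvDict_keys_erase, List.mem_filter]
            constructor
            · rintro ⟨h1, h2⟩
              rcases (hmem2 ch).mp h1 with rfl | h3
              · simp at h2
              · exact h3
            · intro h1
              have hne : ch ≠ left := fun e => hnotin2 (e ▸ h1)
              exact ⟨(hmem2 ch).mpr (Or.inr h1), by simpa using hne⟩
          have H := ih (p ++ [c]) q'' _ _ startN'
            hqinv hgd3 hkeys3 hmem3 hlast1 hslinv hnd' hmin' hleninv
          simpa using H
        · rw [if_neg hv0]
          have hin2 : left ∈ q'' := by
            rcases List.count_pos_iff.mp (show 0 < q''.count left by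
              by_contra hcon
              have h0 : q''.count left = 0 := by omega
              rw [hvleft, h0] at hv0
              simp at hv0) with h
            exact h
          have hmem2' : ∀ ch, ch ∈ (cnt1.insert left (cnt1.getD left 0 - 1)).keys ↔ ch ∈ q'' := by
            intro ch
            rw [hmem2 ch]
            constructor
            · rintro (rfl | h) <;> [exact hin2; exact h]
            · exact Or.inr
          have H := ih (p ++ [c]) q'' _ _ startN'
            hqinv hcnt2 hkeys2 hmem2' hlast1 hslinv hnd' hmin' hleninv
          simpa using H


-- ===== VERDICT (by name: the statement is the Claim_ definition above) =====
theorem first_n_unique_spec : Claim_equal_first_n_unique := by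
  intro s n _
  unfold Spec_first_n_unique first_n_unique first_n_unique_alt
  by_cases hn : n ≤ 0
  · rw [pvLoopA_nonpos n hn, pvLoopB_nonpos n hn]
    · exact le_refl 0
    · intro ch j h; simp [PySem.Dict.get?, PySem.Dict.empty] at h
  · have hnn : 1 ≤ n.toNat := by omega
    have := pvMain n n.toNat (by omega) hnn s.toList [] [] PySem.Dict.empty PySem.Dict.empty 0
      (by simp) (by simp [PySem.Dict.getD_empty]) (by simp [PySem.Dict.keys, PySem.Dict.empty])
      (by simp [PySem.Dict.keys, PySem.Dict.empty]) (by simp [PySem.Dict.get?, PySem.Dict.empty, pvLastOcc])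
      (by simp) (by simp) (by intro m hm; exact absurd hm (by omega)) (by simp; omega)
    simpa using this
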